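-- pv_equiv track=rewrite | github.com/LegionMG/sci_code | ite2.py | string_to_codewalk
-- ===== SOURCE A (Python) =====
-- def string_to_codeword(word):
--     return "".join(["0" if word[i]==word[i+2] else "1" for i in range(len(word)-2)])
--
-- def string_to_codewalk(word):
--     c = 0
--     res = ""
--     word = string_to_codeword(word)
--     s = 0
--     while word[s]!="0":
--         s+=1
--     for i in range(s+1, len(word)):
--         if word[i] == "1":
--             c+=1
--         else:
--             res+=str(c)
--             c = 0
--     return res
-- ===== SOURCE B (Python) =====
-- def string_to_codewalk(word):
--     codeword = "".join(["0" if word[i] == word[i + 2] else "1" for i in range(len(word) - 2)])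
--     segments = codeword[codeword.index("0"):].split("0")
--     return "".join(str(len(seg)) for seg in segments[1:-1])
-- ===== Notes on version B (the rewrite author's own statement) =====
-- stated objective: simpler
-- what changed: Replaces A's find-first-zero while-loop plus counter/reset for-loop by a partition: slice the codeword at its first '0', split it on '0', and emit the lengths of the interior segments.
-- outside the precondition, e.g. on string_to_codewalk('0'): A raises IndexError, B raises ValueError
import Mathlib
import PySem

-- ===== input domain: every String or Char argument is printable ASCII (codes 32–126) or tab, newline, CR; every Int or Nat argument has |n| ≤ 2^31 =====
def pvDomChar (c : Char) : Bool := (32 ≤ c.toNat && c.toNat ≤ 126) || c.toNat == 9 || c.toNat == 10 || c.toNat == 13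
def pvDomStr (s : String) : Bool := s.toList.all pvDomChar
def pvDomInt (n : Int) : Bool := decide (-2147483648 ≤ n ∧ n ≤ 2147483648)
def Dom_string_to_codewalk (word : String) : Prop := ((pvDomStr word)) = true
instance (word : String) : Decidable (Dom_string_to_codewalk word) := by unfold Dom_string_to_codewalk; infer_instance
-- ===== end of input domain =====

-- B replaces A's find-first-zero while-loop plus counter/reset for-loop by a partition:
-- slice the codeword at its first '0', split on '0', emit the interior segments' lengths (objective: simpler).

-- ===== PORT A =====
-- module helper string_to_codeword (shared verbatim by both Pythons), as a list of chars
def pvCodeword (word : String) : List Char :=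
  (PySem.List.pyRange 0 ((word.toList.length : Int) - 2) 1).map
    (fun i => if PySem.List.pyGetD word.toList i ' ' = PySem.List.pyGetD word.toList (i + 2) ' '
              then '0' else '1')

-- the 'while word[s]!="0": s+=1' loop; when s runs past the end Python raises IndexError
-- (excluded by Pre_), the port then returns s as a dummy
def pvFindZero (w : List Char) (s : Nat) : Nat :=
  if h : s < w.length then
    if w[s] = '0' then s else pvFindZero w (s + 1)
  else s
termination_by w.length - s

-- the body of A's for-loop: state (c, res)
def pvWalkStep (st : Int × List Char) (ch : Char) : Int × List Char :=
  if ch = '1' then (st.1 + 1, st.2) else (0, st.2 ++ PySem.Int.toChars st.1)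

def string_to_codewalk (word : String) : String :=
  let w := pvCodeword word
  let s := pvFindZero w 0
  let st := (PySem.List.pyRange ((s : Int) + 1) ((w.length : Int)) 1).foldl
      (fun st i => pvWalkStep st (PySem.List.pyGetD w i ' ')) ((0 : Int), ([] : List Char))
  String.ofList st.2

-- ===== PORT B =====
-- hand port of Python's str.split(sep) for the one-character separator "0"
-- (exact for a single-char separator: empty pieces are kept, split of "" is [""])
def pvSplit0 : List Char → List (List Char)
  | [] => [[]]
  | c :: t =>
    if c = '0' then [] :: pvSplit0 t
    else
      match pvSplit0 t with
      | h :: r => (c :: h) :: r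
      | [] => [[c]]

def string_to_codewalk_alt (word : String) : String :=
  let cw := pvCodeword word
  match PySem.List.index? cw '0' with     -- codeword.index("0"); none = ValueError, outside Pre_
  | none => ""
  | some s =>
    let segments := pvSplit0 (PySem.List.slice cw (some (s : Int)) none)
    let mids := PySem.List.slice segments (some 1) (some (-1))
    String.ofList (PySem.Chars.join [] (mids.map (fun seg => PySem.Int.toChars (seg.length : Int))))

-- ===== PRECONDITION & SPEC =====
-- Pre_ excludes exactly the inputs on which A raises IndexError: words whose codeword
-- contains no '0', i.e. no position i with word[i] == word[i+2] (B raises ValueError there).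
def Pre_string_to_codewalk (word : String) : Prop :=
  ∃ i < word.toList.length, word.toList[i]? = word.toList[i + 2]?
instance (word : String) : Decidable (Pre_string_to_codewalk word) := by
  unfold Pre_string_to_codewalk; infer_instance

def pvWitness_string_to_codewalk : String := "aba"

def Spec_string_to_codewalk (word : String) (out : String) : Prop := out = string_to_codewalk_alt word
instance (word : String) (out : String) : Decidable (Spec_string_to_codewalk word out) := by unfold Spec_string_to_codewalk; infer_instance

-- ===== CLAIM (what is proved, stated in full; the proofs are below) =====
def Claim_equal_string_to_codewalk : Prop := ∀ (word : String), Dom_string_to_codewalk word → Pre_string_to_codewalk word → Spec_string_to_codewalk word (string_to_codewalk word)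

-- ===== LEMMAS AND PROOFS =====

theorem pvSplit0_ne_nil (l : List Char) : pvSplit0 l ≠ [] := by
  cases l with
  | nil => simp [pvSplit0]
  | cons c t =>
    simp only [pvSplit0]
    split_ifs
    · simp
    · cases h : pvSplit0 t <;> simp

-- the counts A emits while walking l with current run length c
def pvCounts (c : Int) (l : List Char) : List Int :=
  match pvSplit0 l with
  | [] => []
  | h :: r => if r = [] then [] else (c + h.length) :: r.dropLast.map (fun seg => (seg.length : Int))

theorem pvCounts_zero (l : List Char) :
    pvCounts 0 l = (pvSplit0 l).dropLast.map (fun seg => (seg.length : Int)) := by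
  cases h : pvSplit0 l with
  | nil => exact absurd h (pvSplit0_ne_nil l)
  | cons hd r =>
    cases r with
    | nil => simp [pvCounts, h]
    | cons a t => simp [pvCounts, h]

theorem pvCounts_cons_zero (c : Int) (t : List Char) :
    pvCounts c ('0' :: t) = c :: pvCounts 0 t := by
  have hs : pvSplit0 ('0' :: t) = [] :: pvSplit0 t := by simp [pvSplit0]
  rw [pvCounts, hs]
  simp [pvSplit0_ne_nil, pvCounts_zero]

theorem pvCounts_cons_ne (c : Int) (ch : Char) (t : List Char) (hch : ch ≠ '0') :
    pvCounts c (ch :: t) = pvCounts (c + 1) t := by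
  cases h : pvSplit0 t with
  | nil => exact absurd h (pvSplit0_ne_nil t)
  | cons hd r =>
    have hs : pvSplit0 (ch :: t) = (ch :: hd) :: r := by simp [pvSplit0, hch, h]
    rw [pvCounts, hs, pvCounts, h]
    cases r with
    | nil => simp
    | cons a s =>
      simp only [List.length_cons]
      push_cast
      ring_nf

theorem pvFoldWalk (l : List Char) (hl : ∀ ch ∈ l, ch = '0' ∨ ch = '1') (c : Int) (res : List Char) :
    (l.foldl pvWalkStep (c, res)).2
      = res ++ ((pvCounts c l).map PySem.Int.toChars).flatten := by
  induction l generalizing c res with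
  | nil => simp [pvCounts, pvSplit0]
  | cons ch t ih =>
    have hcht := fun x hx => hl x (List.mem_cons_of_mem _ hx)
    rcases hl ch (List.mem_cons_self ..) with h0 | h1
    · subst h0
      have : pvWalkStep (c, res) '0' = (0, res ++ PySem.Int.toChars c) := by
        simp [pvWalkStep]
      rw [List.foldl_cons, this, ih hcht, pvCounts_cons_zero]
      simp
    · subst h1
      have : pvWalkStep (c, res) '1' = (c + 1, res) := by simp [pvWalkStep]
      rw [List.foldl_cons, this, ih hcht, pvCounts_cons_ne c '1' t (by decide)]

theorem pvIntersperseNil (parts : List (List Char)) :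
    (List.intersperse ([] : List Char) parts).flatten = parts.flatten := by
  induction parts with
  | nil => simp
  | cons a t ih =>
    cases t with
    | nil => simp
    | cons b u =>
      rw [List.intersperse_cons₂]
      simp only [List.flatten_cons] at ih ⊢
      simp [ih]

theorem pvJoinNilFlatten (parts : List (List Char)) :
    PySem.Chars.join [] parts = parts.flatten := by
  simp [PySem.Chars.join, List.intercalate, pvIntersperseNil]

theorem pvFindZero_eq (w : List Char) (s : Nat) (h : '0' ∈ w.drop s) :
    pvFindZero w s = s + (w.drop s).idxOf '0' := by
  have hlt : s < w.length := by
    by_contra hge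
    rw [List.drop_eq_nil_of_le (by omega)] at h
    simp at h
  rw [List.drop_eq_getElem_cons hlt] at h ⊢
  by_cases h0 : w[s] = '0'
  · rw [pvFindZero, dif_pos hlt, if_pos h0, h0, List.idxOf_cons_self]
    omega
  · have hmem : '0' ∈ w.drop (s + 1) := by
      rcases List.mem_cons.mp h with he | ht
      · exact absurd he.symm h0
      · exact ht
    rw [pvFindZero, dif_pos hlt, if_neg h0, pvFindZero_eq w (s + 1) hmem,
      List.idxOf_cons_ne _ h0]
    omega
termination_by w.length - s

theorem pvSlice_one_neg_one {α : Type} (x : α) (l : List α) :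
    PySem.List.slice (x :: l) (some 1) (some (-1)) = l.dropLast := by
  simp only [PySem.List.slice, PySem.List.clampIdx]
  norm_num
  rw [if_neg (by omega : ¬((l.length : Int) < 0)), List.dropLast_eq_take]

-- every char of the codeword is '0' or '1'
theorem pvLt_idxOf_ne (l : List Char) (j : Nat) (h : j < l.length) (hj : j < l.idxOf '0') :
    ¬ l[j] = '0' := by
  induction l generalizing j with
  | nil => simp at h
  | cons a t ih =>
    by_cases ha : a = '0'
    · rw [List.idxOf_cons, ha] at hj; simp at hj
    · rw [List.idxOf_cons, show (a == '0') = false by simpa using ha] at hj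
      cases j with
      | zero => simpa using ha
      | succ j => simpa using ih j (by simpa using h) (by simpa using hj)

theorem pvCodeword_chars (word : String) : ∀ ch ∈ pvCodeword word, ch = '0' ∨ ch = '1' := by
  intro ch hch
  rw [pvCodeword] at hch
  rcases List.mem_map.mp hch with ⟨i, _, hi⟩
  by_cases h : PySem.List.pyGetD word.toList i ' ' = PySem.List.pyGetD word.toList (i + 2) ' '
  · left; rw [← hi]; simp [h]
  · right; rw [← hi]; simp [h]

theorem pvPre_mem (word : String) (hpre : Pre_string_to_codewalk word) :
    '0' ∈ pvCodeword word := by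
  rcases hpre with ⟨i, hi, heq⟩
  have hi2 : i + 2 < word.toList.length := by
    by_contra hge
    have hn : word.toList[i + 2]? = none := List.getElem?_eq_none_iff.mpr (by omega)
    rw [hn, List.getElem?_eq_getElem hi] at heq
    simp at heq
  rw [pvCodeword]
  refine List.mem_map.mpr ⟨(i : Int), ?_, ?_⟩
  · rw [PySem.List.mem_pyRange_one]
    constructor
    · positivity
    · omega
  · have : PySem.List.pyGetD word.toList (i : Int) ' ' = PySem.List.pyGetD word.toList ((i : Int) + 2) ' ' := by
      have h2 : ((i : Int) + 2) = ((i + 2 : Nat) : Int) := by push_cast; ring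
      rw [h2, PySem.List.pyGetD_natCast, PySem.List.pyGetD_natCast]
      rw [List.getElem?_eq_getElem hi, List.getElem?_eq_getElem hi2] at heq
      simp only [Option.some_inj] at heq
      simp [List.getD_eq_getElem?_getD, List.getElem?_eq_getElem hi, List.getElem?_eq_getElem hi2, heq]
    simp [this]

-- ===== VERDICT (by name: the statement is the Claim_ definition above) =====
theorem string_to_codewalk_spec : Claim_equal_string_to_codewalk := by
  intro word _ hpre
  unfold Spec_string_to_codewalk string_to_codewalk string_to_codewalk_alt
  set w := pvCodeword word with hw
  have hmem : '0' ∈ w := pvPre_mem word hpre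
  set k := w.idxOf '0' with hk
  have hklt : k < w.length := List.idxOf_lt_length_of_mem hmem
  have hgetk : w[k] = '0' := List.getElem_idxOf hklt
  -- A's while loop finds k
  have hfind : pvFindZero w 0 = k := by
    have := pvFindZero_eq w 0 (by simpa using hmem)
    simpa using this
  -- B's index finds k
  have hidx : PySem.List.index? w '0' = some k := by
    rw [PySem.List.index?_eq_idxOf?]
    rw [List.idxOf?_eq_some_iff]
    exact ⟨hklt, hgetk, fun j hj => pvLt_idxOf_ne w j (by omega) (hk ▸ hj)⟩
  simp only []
  rw [hfind, hidx]
  show _ = String.ofList (PySem.Chars.join []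
    ((PySem.List.slice (pvSplit0 (PySem.List.slice w (some (k : Int)) none)) (some 1)
        (some (-1))).map (fun seg => PySem.Int.toChars (seg.length : Int))))
  have hrest : ∀ ch ∈ w.drop (k + 1), ch = '0' ∨ ch = '1' :=
    fun ch hch => pvCodeword_chars word ch (List.mem_of_mem_drop hch)
  have hA : (PySem.List.pyRange ((k : Int) + 1) ((w.length : Int)) 1).foldl
      (fun st i => pvWalkStep st (PySem.List.pyGetD w i ' ')) ((0 : Int), ([] : List Char))
      = (w.drop (k + 1)).foldl pvWalkStep ((0 : Int), ([] : List Char)) := by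
    have h := PySem.List.foldl_pyRange_pyGetD' w ' ' pvWalkStep ((0 : Int), ([] : List Char))
      (a := (k : Int) + 1) (by positivity)
    have ht : ((k : Int) + 1).toNat = k + 1 := by omega
    rw [ht] at h
    exact h
  rw [hA, pvFoldWalk _ hrest, pvCounts_zero]
  rw [PySem.List.slice_from_natCast w k, List.drop_eq_getElem_cons hklt, hgetk]
  rw [show pvSplit0 ('0' :: w.drop (k + 1)) = [] :: pvSplit0 (w.drop (k + 1)) from by
    simp [pvSplit0]]
  rw [pvSlice_one_neg_one, pvJoinNilFlatten]
  simp [List.map_map, Function.comp_def]
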